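-- pv_equiv track=rewrite | github.com/Fondamenti18/fondamenti-di-programmazione | students/1807996/homework03/program03.py | scendi
-- ===== SOURCE A (Python) =====
-- def scendi (img,i,x):
--     ni=i
--     nl=[]
--     nl2=[]
--     for ni in range(i-1,-1,-1):
--         if img[ni][x]==img[i][x]:
--             coo=(ni,x)
--             nl.append(coo)
--             if ni==0:
--                 nl2.append(coo)
--                 break
--             if img[ni-1][x]!=img[i][x]:
--                 nl2.append(coo)
--                 break
--     return nl,nl2
-- ===== SOURCE B (Python) =====
-- def scendi(img, i, x):
--     if i <= 0:
--         return [], []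
--     v = img[i][x]
--     col = [row[x] for row in img[:i]]
--     j = max((r for r in range(i) if col[r] == v), default=-1)
--     if j < 0:
--         return [], []
--     k = max((r for r in range(j + 1) if col[r] != v), default=-1) + 1
--     return [(r, x) for r in range(j, k - 1, -1)], [(k, x)]
-- ===== Notes on version B (the rewrite author's own statement) =====
-- stated objective: alternative
-- what changed: A's single break-laden downward scan that appends matches and tracks nl2 inline is replaced by a staged closed-form computation: materialise the column below i, compute the run's top j and bottom k as max-comprehensions over indices, and emit both result lists directly from ranges (no scanning loop builds the output).
-- outside the precondition, e.g. on scendi([[9], [5, 1], [5, 7], [5, 7]], 3, 1): A returns ([(2, 1)], [(2, 1)]), B raises IndexError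
import Mathlib
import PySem

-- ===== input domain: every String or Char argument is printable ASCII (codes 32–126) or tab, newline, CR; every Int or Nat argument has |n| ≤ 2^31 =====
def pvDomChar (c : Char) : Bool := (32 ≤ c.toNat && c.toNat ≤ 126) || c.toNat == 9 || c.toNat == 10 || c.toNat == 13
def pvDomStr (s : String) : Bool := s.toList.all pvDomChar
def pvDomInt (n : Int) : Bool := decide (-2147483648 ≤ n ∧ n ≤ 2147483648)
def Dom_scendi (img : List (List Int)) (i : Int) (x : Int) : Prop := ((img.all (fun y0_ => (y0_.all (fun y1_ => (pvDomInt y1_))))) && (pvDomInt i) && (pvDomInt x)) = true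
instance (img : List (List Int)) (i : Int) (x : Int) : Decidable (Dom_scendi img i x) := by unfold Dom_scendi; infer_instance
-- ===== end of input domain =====

-- B replaces A's break-laden downward scan (matches appended, nl2 tracked inline) by a staged
-- closed-form computation: materialise the column below i, compute the run boundaries j (top)
-- and k (bottom) as max-comprehensions over indices, and emit both lists from ranges.

-- img[ni][x], total form; exact (Python negative-index semantics) whenever both
-- indices are in Python range, which Pre_ guarantees for every cell either port reads.
def pvCell (img : List (List Int)) (ni x : Int) : Int :=
  PySem.List.pyGetD ((PySem.List.pyGet? img ni).getD []) x 0

-- ===== PORT A =====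
def scendiLoopA (img : List (List Int)) (x v : Int) :
    List Int → List (Int × Int) → (List (Int × Int)) × (List (Int × Int))
  | [], nl => (nl, [])
  | ni :: rest, nl =>
    if pvCell img ni x = v then
      let coo : Int × Int := (ni, x)
      let nl' := nl ++ [coo]
      if ni = 0 then (nl', [coo])
      else if pvCell img (ni - 1) x ≠ v then (nl', [coo])
      else scendiLoopA img x v rest nl'
    else scendiLoopA img x v rest nl

def scendi (img : List (List Int)) (i : Int) (x : Int) : (List (Int × Int)) × (List (Int × Int)) :=
  scendiLoopA img x (pvCell img i x) (PySem.List.pyRange (i - 1) (-1) (-1)) []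

-- ===== PORT B =====
def scendi_alt (img : List (List Int)) (i : Int) (x : Int) : (List (Int × Int)) × (List (Int × Int)) :=
  if i ≤ 0 then ([], [])
  else
    let v := pvCell img i x
    let col := (PySem.List.slice img none (some i)).map (fun row => PySem.List.pyGetD row x 0)
    let j := ((PySem.List.pyRange 0 i 1).filter
        (fun r => PySem.List.pyGetD col r 0 == v)).foldl max (-1)
    if j < 0 then ([], [])
    else
      let k := ((PySem.List.pyRange 0 (j + 1) 1).filter
          (fun r => !(PySem.List.pyGetD col r 0 == v))).foldl max (-1) + 1
      ((PySem.List.pyRange j (k - 1) (-1)).map (fun r => (r, x)), [(k, x)])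

-- ===== PRECONDITION & SPEC =====
-- Exactly the exception-free inputs, up to one stated narrowing: for i > 0 we require
-- every row 0..i to admit Python index x, which also excludes some ragged grids on
-- which A returns because its scan breaks before reaching a too-short row (see claim cites).
def Pre_scendi (img : List (List Int)) (i : Int) (x : Int) : Prop :=
  i ≤ 0 ∨ (i < (img.length : Int) ∧
    ∀ row ∈ img.take (i.toNat + 1), PySem.Raise.InRange row.length x)
instance (img : List (List Int)) (i : Int) (x : Int) : Decidable (Pre_scendi img i x) := by
  unfold Pre_scendi; infer_instance

def pvWitness_scendi : List (List Int) × Int × Int := ([[1], [2], [1], [1]], 3, 0)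

def Spec_scendi (img : List (List Int)) (i : Int) (x : Int) (out : (List (Int × Int)) × (List (Int × Int))) : Prop := out = scendi_alt img i x
instance (img : List (List Int)) (i : Int) (x : Int) (out : (List (Int × Int)) × (List (Int × Int))) : Decidable (Spec_scendi img i x out) := by unfold Spec_scendi; infer_instance

-- ===== CLAIM (what is proved, stated in full; the proofs are below) =====
def Claim_equal_scendi : Prop := ∀ (img : List (List Int)) (i : Int) (x : Int), Dom_scendi img i x → Pre_scendi img i x → Spec_scendi img i x (scendi img i x)

-- ===== LEMMAS AND PROOFS =====

-- proof-side characterisation of A's scan: a skip phase then a collect phase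
def pvSkipB (img : List (List Int)) (x v : Int) : Nat → Nat
  | 0 => 0
  | m + 1 => if pvCell img (m : Int) x ≠ v then pvSkipB img x v m else m + 1

def pvCollectB (img : List (List Int)) (x v : Int) : Nat → List (Int × Int)
  | 0 => []
  | m + 1 => if pvCell img (m : Int) x = v then ((m : Int), x) :: pvCollectB img x v m else []

def pvLastSingleton (l : List (Int × Int)) : List (Int × Int) :=
  match l.getLast? with
  | some c => [c]
  | none => []

-- last index below n satisfying p, plus one (0 if none)
def lastHit (p : Nat → Bool) : Nat → Nat
  | 0 => 0
  | m + 1 => if p m then m + 1 else lastHit p m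

theorem lastHit_le (p : Nat → Bool) (n : Nat) : lastHit p n ≤ n := by
  induction n with
  | zero => simp [lastHit]
  | succ m ih =>
    by_cases h : p m
    · simp [lastHit, h]
    · simp [lastHit, h]; omega

theorem pvLastSingleton_cons (c : Int × Int) (l : List (Int × Int)) (h : l ≠ []) :
    pvLastSingleton (c :: l) = pvLastSingleton l := by
  cases l with
  | nil => exact absurd rfl h
  | cons d t => simp [pvLastSingleton]

-- A's loop skips non-matching rows exactly like the skip phase
theorem loopA_skip (img : List (List Int)) (x v : Int) (n : Nat) (nl : List (Int × Int)) :
    scendiLoopA img x v (PySem.List.pyRange ((n : Int) - 1) (-1) (-1)) nl =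
    scendiLoopA img x v (PySem.List.pyRange ((pvSkipB img x v n : Int) - 1) (-1) (-1)) nl := by
  induction n with
  | zero => simp [pvSkipB]
  | succ m ih =>
    by_cases h : pvCell img (m : Int) x = v
    · simp [pvSkipB, h]
    · have e : ((m + 1 : Nat) : Int) - 1 = (m : Int) := by push_cast; ring
      rw [e, PySem.List.pyRange_neg_one_cons (by omega)]
      simp only [scendiLoopA, if_neg h]
      have e2 : pvSkipB img x v (m + 1) = pvSkipB img x v m := by simp [pvSkipB, h]
      rw [e2]; exact ih

-- the skip phase stops at 0 or at a matching row
theorem pvSkipB_spec (img : List (List Int)) (x v : Int) (n : Nat) :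
    pvSkipB img x v n = 0 ∨ pvCell img ((pvSkipB img x v n : Int) - 1) x = v := by
  induction n with
  | zero => left; rfl
  | succ m ih =>
    by_cases h : pvCell img (m : Int) x = v
    · right
      have e2 : pvSkipB img x v (m + 1) = m + 1 := by simp [pvSkipB, h]
      rw [e2]
      have e : ((m + 1 : Nat) : Int) - 1 = (m : Int) := by push_cast; ring
      rw [e]; exact h
    · have e2 : pvSkipB img x v (m + 1) = pvSkipB img x v m := by simp [pvSkipB, h]
      rw [e2]; exact ih

-- from a matching row down, A's loop returns the collected run, with nl2 its last element
theorem loopA_collect (img : List (List Int)) (x v : Int) (s : Nat)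
    (hs : s = 0 ∨ pvCell img ((s : Int) - 1) x = v) (nl : List (Int × Int)) :
    scendiLoopA img x v (PySem.List.pyRange ((s : Int) - 1) (-1) (-1)) nl =
    (nl ++ pvCollectB img x v s, pvLastSingleton (pvCollectB img x v s)) := by
  induction s generalizing nl with
  | zero =>
    rw [PySem.List.pyRange_neg_one_eq_nil (by omega)]
    simp [scendiLoopA, pvCollectB, pvLastSingleton]
  | succ m ih =>
    have hm : pvCell img (m : Int) x = v := by
      rcases hs with hs | hs
      · exact absurd hs (Nat.succ_ne_zero m)
      · have e : ((m + 1 : Nat) : Int) - 1 = (m : Int) := by push_cast; ring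
        rwa [e] at hs
    have e : ((m + 1 : Nat) : Int) - 1 = (m : Int) := by push_cast; ring
    rw [e, PySem.List.pyRange_neg_one_cons (by omega)]
    cases m with
    | zero =>
      have hm0 : pvCell img 0 x = v := by simpa using hm
      simp [scendiLoopA, hm0, pvCollectB, pvLastSingleton]
    | succ k =>
      have hcast : ((k + 1 : Nat) : Int) - 1 = (k : Int) := by push_cast; ring
      have hne : ((k + 1 : Nat) : Int) ≠ 0 := by omega
      have hcol2 : pvCollectB img x v (k + 1 + 1) =
          (((k + 1 : Nat) : Int), x) :: pvCollectB img x v (k + 1) := by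
        simp only [pvCollectB, if_pos hm]
      by_cases hk : pvCell img (k : Int) x = v
      · have hk1 : pvCell img (((k + 1 : Nat) : Int) - 1) x = v := by rw [hcast]; exact hk
        have hcol1 : pvCollectB img x v (k + 1) =
            (((k : Nat) : Int), x) :: pvCollectB img x v k := by
          simp only [pvCollectB, if_pos hk]
        simp only [scendiLoopA, if_pos hm, if_neg hne, ite_not, if_pos hk1]
        rw [ih (Or.inr hk1) (nl ++ [(((k + 1 : Nat) : Int), x)])]
        rw [hcol2, pvLastSingleton_cons _ _ (by rw [hcol1]; simp), List.append_assoc]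
        rfl
      · have hk1 : ¬ pvCell img (((k + 1 : Nat) : Int) - 1) x = v := by rw [hcast]; exact hk
        have hcol1 : pvCollectB img x v (k + 1) = [] := by
          simp only [pvCollectB, if_neg hk]
        simp only [scendiLoopA, if_pos hm, if_neg hne, ite_not, if_neg hk1]
        rw [hcol2, hcol1]
        simp [pvLastSingleton]

-- max over the filtered index range computes lastHit - 1
theorem foldl_max_filter (q : Int → Bool) (p : Nat → Bool) (n : Nat)
    (h : ∀ m : Nat, m < n → q (m : Int) = p m) :
    ((PySem.List.pyRange 0 (n : Int) 1).filter q).foldl max (-1) = (lastHit p n : Int) - 1 := by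
  induction n with
  | zero => simp [PySem.List.pyRange_one_eq_nil, lastHit]
  | succ m ih =>
    have e : ((m + 1 : Nat) : Int) = (m : Int) + 1 := by push_cast; ring
    rw [e, PySem.List.pyRange_one_succ_right (by omega), List.filter_append,
        List.foldl_append]
    have hq : q (m : Int) = p m := h m (by omega)
    have ihh := ih (fun r hr => h r (by omega))
    by_cases hp : p m
    · have : (lastHit p m : Int) - 1 ≤ (m : Int) := by
        have := lastHit_le p m; omega
      simp [hq, hp, lastHit, ihh, this]
    · simp [hq, hp, lastHit, ihh]

theorem skip_eq_lastHit (img : List (List Int)) (x v : Int) (n : Nat) :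
    pvSkipB img x v n = lastHit (fun m => pvCell img (m : Int) x == v) n := by
  induction n with
  | zero => rfl
  | succ m ih =>
    by_cases h : pvCell img (m : Int) x = v <;>
      simp [pvSkipB, lastHit, h, ih]

-- the collect phase is exactly the range from s-1 down to lastHit(mismatch)
theorem collect_eq_range (img : List (List Int)) (x v : Int) (s : Nat) :
    pvCollectB img x v s =
    (PySem.List.pyRange ((s : Int) - 1)
      ((lastHit (fun m => !(pvCell img (m : Int) x == v)) s : Int) - 1) (-1)).map
      (fun r => (r, x)) := by
  induction s with
  | zero => rw [PySem.List.pyRange_neg_one_eq_nil (by simp [lastHit])]; rfl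
  | succ m ih =>
    have e : ((m + 1 : Nat) : Int) - 1 = (m : Int) := by push_cast; ring
    by_cases h : pvCell img (m : Int) x = v
    · have hkk := lastHit_le (fun m => !(pvCell img (m : Int) x == v)) m
      have hl : lastHit (fun m => !(pvCell img (m : Int) x == v)) (m + 1) =
          lastHit (fun m => !(pvCell img (m : Int) x == v)) m := by
        simp [lastHit, h]
      rw [e, hl, PySem.List.pyRange_neg_one_cons (by omega)]
      simp only [pvCollectB, if_pos h, List.map_cons]
      rw [ih]
    · have hl : lastHit (fun m => !(pvCell img (m : Int) x == v)) (m + 1) = m + 1 := by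
        simp [lastHit, h]
      rw [e, hl]
      simp only [pvCollectB, if_neg h]
      rw [PySem.List.pyRange_neg_one_eq_nil (by push_cast; omega)]
      rfl

theorem getLast?_pyRange_neg_one (a b : Int) (h : b < a) :
    (PySem.List.pyRange a b (-1)).getLast? = some (b + 1) := by
  rw [PySem.List.pyRange_neg_one_eq_reverse, List.getLast?_reverse,
      PySem.List.pyRange_one_cons (by omega)]
  rfl

theorem lastSingleton_collect (img : List (List Int)) (x v : Int) (s : Nat)
    (hs : 0 < s) (hv : pvCell img ((s : Int) - 1) x = v) :
    pvLastSingleton (pvCollectB img x v s) =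
    [((lastHit (fun m => !(pvCell img (m : Int) x == v)) s : Int), x)] := by
  have hkk : lastHit (fun m => !(pvCell img (m : Int) x == v)) s < s := by
    cases s with
    | zero => omega
    | succ m =>
      have hv' : pvCell img (m : Int) x = v := by
        have e : ((m + 1 : Nat) : Int) - 1 = (m : Int) := by push_cast; ring
        rwa [e] at hv
      have : lastHit (fun m => !(pvCell img (m : Int) x == v)) (m + 1) =
          lastHit (fun m => !(pvCell img (m : Int) x == v)) m := by
        simp [lastHit, hv']
      rw [this]
      have := lastHit_le (fun m => !(pvCell img (m : Int) x == v)) m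
      omega
  rw [collect_eq_range]
  unfold pvLastSingleton
  rw [List.getLast?_map, getLast?_pyRange_neg_one _ _ (by omega)]
  simp

-- under Pre_ with 0 < i, B's column lookup agrees with pvCell on every row below i
theorem col_access (img : List (List Int)) (i x : Int) (hi : 0 < i)
    (hlen : i < (img.length : Int))
    (m : Nat) (hm : (m : Int) < i) :
    PySem.List.pyGetD
      (((PySem.List.slice img none (some i)).map (fun row => PySem.List.pyGetD row x 0)))
      (m : Int) 0 = pvCell img (m : Int) x := by
  rw [PySem.List.slice_to _ (by omega)]
  have hmlen : m < img.length := by omega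
  have hmtake : m < (img.take i.toNat).length := by
    rw [List.length_take]; omega
  rw [PySem.List.pyGetD_natCast, List.getD_eq_getElem _ _ (by simpa using hmtake)]
  simp only [List.getElem_map, List.getElem_take]
  unfold pvCell
  rw [PySem.List.pyGet?_natCast]
  simp [List.getElem?_eq_getElem hmlen]

-- ===== VERDICT (by name: the statement is the Claim_ definition above) =====
theorem scendi_spec : Claim_equal_scendi := by
  intro img i x _ hpre
  unfold Spec_scendi scendi scendi_alt
  by_cases hi : i ≤ 0
  · rw [PySem.List.pyRange_neg_one_eq_nil (by omega)]
    simp [scendiLoopA, hi]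
  · obtain ⟨n, rfl⟩ : ∃ n : Nat, i = (n : Int) :=
      ⟨i.toNat, (Int.toNat_of_nonneg (by omega)).symm⟩
    have hlen : (n : Int) < (img.length : Int) := by
      rcases hpre with h | ⟨h, _⟩; · omega
      · exact h
    set v := pvCell img (n : Int) x with hv
    rw [if_neg hi]
    rw [loopA_skip img x v n []]
    rw [loopA_collect img x v _ (pvSkipB_spec img x v n)]
    set s := pvSkipB img x v n with hsdef
    have hcong : ∀ m : Nat, m < n →
        (PySem.List.pyGetD
          (((PySem.List.slice img none (some (n : Int))).map (fun row => PySem.List.pyGetD row x 0)))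
          (m : Int) 0 == v) = (pvCell img (m : Int) x == v) := by
      intro m hm
      rw [col_access img (n : Int) x (by omega) hlen m (by omega)]
    have hj : ((PySem.List.pyRange 0 (n : Int) 1).filter
        (fun r => PySem.List.pyGetD
          (((PySem.List.slice img none (some (n : Int))).map (fun row => PySem.List.pyGetD row x 0)))
          r 0 == v)).foldl max (-1) = (s : Int) - 1 := by
      rw [foldl_max_filter _ (fun m => pvCell img (m : Int) x == v) n hcong]
      rw [hsdef, skip_eq_lastHit]
    simp only [List.nil_append, hj]
    have hsle : s ≤ n := by
      rw [hsdef, skip_eq_lastHit]; exact lastHit_le _ n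
    by_cases hs0 : s = 0
    · rw [if_pos (by omega)]
      simp [hs0, pvCollectB, pvLastSingleton]
    · rw [if_neg (by omega)]
      have hv' : pvCell img ((s : Int) - 1) x = v := by
        rcases pvSkipB_spec img x v n with h | h
        · exact absurd h hs0
        · exact h
      have hk : ((PySem.List.pyRange 0 ((s : Int) - 1 + 1) 1).filter
          (fun r => !(PySem.List.pyGetD
            (((PySem.List.slice img none (some (n : Int))).map (fun row => PySem.List.pyGetD row x 0)))
            r 0 == v))).foldl max (-1) =
          (lastHit (fun m => !(pvCell img (m : Int) x == v)) s : Int) - 1 := by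
        rw [show (s : Int) - 1 + 1 = ((s : Nat) : Int) by ring]
        exact foldl_max_filter _ (fun m => !(pvCell img (m : Int) x == v)) s
          (fun m hm => by rw [hcong m (by omega)])
      rw [hk]
      rw [lastSingleton_collect img x v s (by omega) hv', collect_eq_range img x v s]
      set kk := lastHit (fun m => !(pvCell img (m : Int) x == v)) s with hkkdef
      rw [show (kk : Int) - 1 + 1 - 1 = (kk : Int) - 1 by ring,
          show (kk : Int) - 1 + 1 = (kk : Int) by ring]
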